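-- pv_equiv track=rewrite | github.com/Himanshu-mani/LeetCode-Odyssey | Day_21/sum_of_unique_elements.py | sumOfUnique
-- ===== SOURCE A (Python) =====
-- def sumOfUnique(nums):
--     """
--     :type nums: List[int]
--     :rtype: int
--     """
--     # Step 1: Create a dictionary to store the count of each number
--     count = {}
--
--     # Step 2: Loop through the array and update frequencies
--     for i in nums:
--         # Using .get(i, 0) to avoid errors if the number is new
--         count[i] = count.get(i, 0) + 1
--
--     total_sum = 0
--
--     # Step 3: Loop through the dictionary keys
--     for i in count:
--         # Only add the number if it appeared exactly once
--         if count[i] == 1: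
--             total_sum += i
--
--     return total_sum
-- ===== SOURCE B (Python) =====
-- def sumOfUnique(nums):
--     """
--     :type nums: List[int]
--     :rtype: int
--     """
--     s = sorted(nums)
--     total = 0
--     i = 0
--     n = len(s)
--     while i < n:
--         j = i + 1
--         while j < n and s[j] == s[i]:
--             j += 1
--         if j == i + 1:
--             total += s[i]
--         i = j
--     return total
-- ===== Notes on version B (the rewrite author's own statement) =====
-- stated objective: alternative
-- what changed: Replaces the frequency-dictionary build plus key-scan with sorting a copy of nums and one run-length scan of the sorted list: an element is added exactly when its run has length 1 (neighbors differ).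
import Mathlib
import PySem

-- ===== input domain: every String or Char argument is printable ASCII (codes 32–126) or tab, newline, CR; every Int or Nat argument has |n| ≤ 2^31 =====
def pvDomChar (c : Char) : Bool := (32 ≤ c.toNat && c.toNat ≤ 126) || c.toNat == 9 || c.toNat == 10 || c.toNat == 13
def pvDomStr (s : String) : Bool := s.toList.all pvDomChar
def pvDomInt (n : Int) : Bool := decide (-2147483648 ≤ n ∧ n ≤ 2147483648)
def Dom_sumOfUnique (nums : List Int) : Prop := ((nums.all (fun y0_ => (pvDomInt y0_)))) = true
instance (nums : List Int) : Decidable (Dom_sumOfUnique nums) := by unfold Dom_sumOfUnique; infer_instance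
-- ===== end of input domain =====

-- B replaces A's frequency dictionary and key-scan with sorting a copy of nums and
-- one run-length scan of the sorted list (an element is added iff its run has length 1).

-- ===== PORT A =====
def sumOfUnique (nums : List Int) : Int :=
  -- count = {}; for i in nums: count[i] = count.get(i, 0) + 1
  let count : PySem.Dict Int Int :=
    nums.foldl (fun d i => d.insert i (d.getD i 0 + 1)) PySem.Dict.empty
  -- total_sum = 0; for i in count: if count[i] == 1: total_sum += i
  count.keys.foldl (fun total_sum i => if count.getD i 0 = 1 then total_sum + i else total_sum) 0

-- ===== PORT B =====
-- the outer while loop of Source B: at position i of the sorted list the remaining suffix is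
-- x :: rest; the inner while loop advances j over the copies of x (= rest.takeWhile (== x));
-- 'if j == i + 1' is 'run is empty'; 'i = j' drops the run.
def pvRunScan : List Int → Int
  | [] => 0
  | x :: rest =>
    let run := rest.takeWhile (fun y => y == x)
    (if run.length = 0 then x else 0) + pvRunScan (rest.drop run.length)
termination_by l => l.length
decreasing_by
  simp only [List.length_cons, List.length_drop]
  omega

def sumOfUnique_alt (nums : List Int) : Int :=
  -- s = sorted(nums); then the while loop above
  pvRunScan (PySem.List.sorted nums (fun x => x) false)

-- ===== PRECONDITION & SPEC =====
def Spec_sumOfUnique (nums : List Int) (out : Int) : Prop := out = sumOfUnique_alt nums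
instance (nums : List Int) (out : Int) : Decidable (Spec_sumOfUnique nums out) := by unfold Spec_sumOfUnique; infer_instance

-- ===== CLAIM (what is proved, stated in full; the proofs are below) =====
def Claim_equal_sumOfUnique : Prop := ∀ (nums : List Int), Dom_sumOfUnique nums → Spec_sumOfUnique nums (sumOfUnique nums)

-- ===== LEMMAS AND PROOFS =====

-- the if-accumulating fold is the sum of the filtered list
theorem foldl_if_add_eq_sum_filter (p : Int → Bool) (l : List Int) (s : Int) :
    l.foldl (fun t i => if p i then t + i else t) s = s + (l.filter p).sum := by
  induction l generalizing s with
  | nil => simp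
  | cons a l ih =>
    by_cases h : p a = true <;> simp [h, ih, add_assoc]

-- the count-1 elements of the deduplicated list are a permutation of those of the list
theorem filter_ofList_perm (l : List Int) :
    ((PySem.Set.ofList l).filter (fun x => l.count x == 1)).Perm
      (l.filter (fun x => l.count x == 1)) := by
  rw [List.perm_iff_count]
  intro a
  by_cases h : l.count a = 1
  · have hb : (l.count a == 1) = true := by simpa using h
    have hm : a ∈ l := List.count_pos_iff.mp (by omega)
    rw [List.count_filter (p := fun x => l.count x == 1) hb,
      List.count_filter (p := fun x => l.count x == 1) hb, h,
      List.count_eq_one_of_mem (PySem.Set.nodup_ofList l) ((PySem.Set.mem_ofList l a).mpr hm)]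
  · have hb : (l.count a == 1) = false := by simpa using h
    have h1 : a ∉ (PySem.Set.ofList l).filter (fun x => l.count x == 1) := by
      simp [List.mem_filter, hb]
    have h2 : a ∉ l.filter (fun x => l.count x == 1) := by
      simp [List.mem_filter, hb]
    rw [List.count_eq_zero.mpr h1, List.count_eq_zero.mpr h2]

-- A computes the sum of the elements whose multiplicity in nums is 1
theorem A_eq_filter_sum (nums : List Int) :
    sumOfUnique nums = (nums.filter (fun x => nums.count x == 1)).sum := by
  unfold sumOfUnique
  rw [PySem.Dict.foldl_insert_getD_add_one_eq_counter]
  show (PySem.Dict.counter nums).keys.foldl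
      (fun total_sum i => if (PySem.Dict.counter nums).getD i 0 = 1 then total_sum + i else total_sum) 0
    = (nums.filter (fun x => nums.count x == 1)).sum
  rw [PySem.Dict.keys_counter]
  rw [List.foldl_ext _ (fun t i => if (nums.count i == 1) = true then t + i else t) 0
    (by intro t i _; simp only [PySem.Dict.getD_counter]
        by_cases h : nums.count i = 1 <;> simp [h])]
  rw [foldl_if_add_eq_sum_filter, zero_add]
  exact (filter_ofList_perm nums).sum_eq

-- the run scan of a sorted (Pairwise ≤) list is the sum of its multiplicity-1 elements
theorem runScan_sorted : ∀ (n : Nat) (s : List Int), s.length ≤ n →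
    s.Pairwise (· ≤ ·) →
    pvRunScan s = (s.filter (fun y => s.count y == 1)).sum := by
  intro n
  induction n with
  | zero =>
    intro s hl _
    have : s = [] := List.length_eq_zero_iff.mp (Nat.le_zero.mp hl)
    subst this; simp [pvRunScan]
  | succ n ih =>
    intro s hl hpw
    match s with
    | [] => simp [pvRunScan]
    | x :: rest =>
      have hrest : rest.length ≤ n := by simpa using hl
      have hxle : ∀ y ∈ rest, x ≤ y := (List.pairwise_cons.mp hpw).1
      have hpwrest : rest.Pairwise (· ≤ ·) := (List.pairwise_cons.mp hpw).2
      set rep := rest.takeWhile (fun y => y == x) with hrep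
      set tail := rest.dropWhile (fun y => y == x) with htail
      have hsplit : rep ++ tail = rest := List.takeWhile_append_dropWhile
      have hrepx : ∀ y ∈ rep, y = x := by
        intro y hy
        have := List.mem_takeWhile_imp hy
        simpa using this
      have hpwtail : tail.Pairwise (· ≤ ·) := by
        have := hsplit ▸ hpwrest
        exact (List.pairwise_append.mp this).2.1
      have htailsub : ∀ y ∈ tail, y ∈ rest := by
        intro y hy; rw [← hsplit]; exact List.mem_append_right _ hy
      -- x does not occur in tail: its head differs from x and is ≤/≥-squeezed
      have hxtail : x ∉ tail := by
        intro hx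
        obtain ⟨t, tt, htt⟩ : ∃ t tt, tail = t :: tt := by
          cases h : tail with
          | nil => rw [h] at hx; exact absurd hx (List.not_mem_nil)
          | cons a b => exact ⟨a, b, rfl⟩
        have hne' : List.dropWhile (fun y => y == x) rest ≠ [] := by
          rw [← htail, htt]; simp
        have hhd : ((List.dropWhile (fun y => y == x) rest).head hne' == x) = false :=
          List.head_dropWhile_not _ hne'
        have hdt : List.dropWhile (fun y => y == x) rest = t :: tt := by rw [← htail, htt]
        have hh2 : (List.dropWhile (fun y => y == x) rest).head? = some t := by
          rw [hdt]; rfl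
        have hh3 := List.head?_eq_some_head (l := List.dropWhile (fun y => y == x) rest) hne'
        rw [hh2] at hh3
        have hh4 : (List.dropWhile (fun y => y == x) rest).head hne' = t := by
          injection hh3.symm
        rw [hh4] at hhd
        have htne : t ≠ x := by simpa using hhd
        rw [htt] at hx hpwtail
        rcases List.mem_cons.mp hx with h | h
        · exact htne h.symm
        · have h1 : x ≤ t := hxle t (htailsub t (by rw [htt]; simp))
          have h2 : t ≤ x := (List.pairwise_cons.mp hpwtail).1 x h
          exact htne (le_antisymm h2 h1)
      have hxrep : rep.count x = rep.length :=
        List.count_eq_length.mpr (fun y hy => (hrepx y hy).symm)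
      have hcx : (x :: rest).count x = rep.length + 1 := by
        rw [List.count_cons_self]
        conv_lhs => rw [← hsplit]
        rw [List.count_append, hxrep, List.count_eq_zero.mpr hxtail]
      -- unfold one step of the scan
      have hscan : pvRunScan (x :: rest)
          = (if rep.length = 0 then x else 0) + pvRunScan tail := by
        rw [pvRunScan]
        have hdl : rest.drop rep.length = tail := by
          conv_lhs => rw [← hsplit]
          exact List.drop_left (l₁ := rep) (l₂ := tail)
        rw [← hrep, hdl]
      have htlen : tail.length ≤ n := by
        have : tail.length ≤ rest.length := by rw [← hsplit]; simp
        omega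
      rw [hscan, ih tail htlen hpwtail]
      -- the filtered rest is the filtered tail
      have hPrest : List.filter (fun y => List.count y (x :: rest) == 1) rest
          = List.filter (fun y => List.count y tail == 1) tail := by
        have h0 : List.filter (fun y => List.count y (x :: rest) == 1) rest
            = List.filter (fun y => List.count y (x :: rest) == 1) (rep ++ tail) := by
          rw [hsplit]
        rw [h0, List.filter_append]
        have h2 : List.filter (fun y => List.count y (x :: rest) == 1) rep = [] := by
          rw [List.filter_eq_nil_iff]
          intro y hy
          have hynil : rep ≠ [] := List.ne_nil_of_mem hy
          have hlen : 0 < rep.length := List.length_pos_iff.mpr hynil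
          rw [hrepx y hy, hcx]
          simp only [beq_iff_eq]
          omega
        rw [h2, List.nil_append]
        apply List.filter_congr
        intro y hy
        have hyx : y ≠ x := fun h => hxtail (h ▸ hy)
        have hyrep : y ∉ rep := fun h => hyx (hrepx y h)
        have hcy : List.count y rest = List.count y tail := by
          conv_lhs => rw [← hsplit]
          rw [List.count_append, List.count_eq_zero.mpr hyrep, Nat.zero_add]
        simp [Ne.symm hyx, hcy]
      rw [List.filter_cons, hPrest, hcx]
      by_cases hk : rep.length = 0 <;> simp [hk]

theorem sumOfUnique_spec : Claim_equal_sumOfUnique := by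
  intro nums _
  show sumOfUnique nums = sumOfUnique_alt nums
  rw [A_eq_filter_sum]
  unfold sumOfUnique_alt
  set s := PySem.List.sorted nums (fun x => x) false with hs
  have hperm : s.Perm nums := PySem.List.sorted_perm nums (fun x => x) false
  have hpw : s.Pairwise (· ≤ ·) := by
    have := PySem.List.sorted_pairwise (xs := nums) (key := fun x => x)
    simpa using this
  rw [runScan_sorted s.length s le_rfl hpw]
  have hcnt : ∀ y, s.count y = nums.count y := fun y => hperm.count_eq y
  have hfe : s.filter (fun y => s.count y == 1) = s.filter (fun y => nums.count y == 1) := by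
    apply List.filter_congr; intro y _; rw [hcnt]
  rw [hfe]
  exact ((hperm.filter (fun y => nums.count y == 1)).sum_eq).symm
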